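-- pv_equiv track=rewrite | github.com/sadpepesadsing/coderun | 3.py | make_sum_map
-- ===== SOURCE A (Python) =====
-- def make_sum_map(n, m, origin_map):
--     summs_map = [[0 for i in range(m)] for g in range(n)]
--     summs_map[0][0] = origin_map[0][0]
--
--     for i in range(1, m):
--         summs_map[0][i] = summs_map[0][i-1] + origin_map[0][i]
--
--     for i in range(1, n):
--         summs_map[i][0] = summs_map[i-1][0] + origin_map[i][0]
--
--     for i in range(1, m):
--         for g in range(1, n):
--             summs_map[g][i] = max(summs_map[g-1][i], summs_map[g][i-1]) + origin_map[g][i]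
--
--     return summs_map
-- ===== SOURCE B (Python) =====
-- def make_sum_map(n, m, origin_map):
--     summs = [[0] * m for _ in range(n)]
--     summs[0][0] = origin_map[0][0]
--     for d in range(1, n + m - 1):
--         first = max(0, d - m + 1)
--         last = min(d, n - 1)
--         for g in range(first, last + 1):
--             i = d - g
--             if g == 0:
--                 best = summs[0][i - 1]
--             elif i == 0:
--                 best = summs[g - 1][0]
--             else:
--                 best = max(summs[g - 1][i], summs[g][i - 1])
--             summs[g][i] = best + origin_map[g][i]
--     return summs
-- ===== Notes on version B (the rewrite author's own statement) =====
-- stated objective: alternative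
-- what changed: A fills the DP table in four staged passes (corner, top row, left column, then a column-major interior sweep); B fills it by anti-diagonal wavefronts d = g+i, processing each diagonal's cells in one loop -- a different traversal order that is valid because every cell depends only on the previous diagonal.
import Mathlib
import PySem

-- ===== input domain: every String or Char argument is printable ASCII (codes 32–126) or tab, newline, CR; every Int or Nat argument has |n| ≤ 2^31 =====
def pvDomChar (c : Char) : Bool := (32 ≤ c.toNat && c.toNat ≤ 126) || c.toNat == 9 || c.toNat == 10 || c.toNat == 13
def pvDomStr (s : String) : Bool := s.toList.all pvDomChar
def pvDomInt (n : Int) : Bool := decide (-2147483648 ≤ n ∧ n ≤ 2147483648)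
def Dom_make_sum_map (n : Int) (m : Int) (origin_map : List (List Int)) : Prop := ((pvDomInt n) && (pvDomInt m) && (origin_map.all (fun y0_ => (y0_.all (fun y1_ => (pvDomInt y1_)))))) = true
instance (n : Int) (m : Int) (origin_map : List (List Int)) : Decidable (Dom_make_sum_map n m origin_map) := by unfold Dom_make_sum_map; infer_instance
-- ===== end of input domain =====

-- B fills the DP table by anti-diagonal wavefronts (d = g+i) instead of A's four staged row/column/interior passes; equal wherever A returns.

-- ===== PORT A =====
-- t[a][b] read/write; exact for Python's t[a][b] whenever the indices are in range, which Pre_ guarantees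
def pvGet2 (t : List (List Int)) (a b : Int) : Int :=
  PySem.List.pyGetD (PySem.List.pyGetD t a []) b 0

def pvSet2 (t : List (List Int)) (a b : Int) (v : Int) : List (List Int) :=
  PySem.List.pySetD t a (PySem.List.pySetD (PySem.List.pyGetD t a []) b v)

def make_sum_map (n : Int) (m : Int) (origin_map : List (List Int)) : List (List Int) :=
  let s0 := (PySem.List.pyRange 0 n 1).map (fun _ => (PySem.List.pyRange 0 m 1).map (fun _ => (0 : Int)))
  let s1 := pvSet2 s0 0 0 (pvGet2 origin_map 0 0)
  let s2 := (PySem.List.pyRange 1 m 1).foldl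
      (fun t i => pvSet2 t 0 i (pvGet2 t 0 (i - 1) + pvGet2 origin_map 0 i)) s1
  let s3 := (PySem.List.pyRange 1 n 1).foldl
      (fun t i => pvSet2 t i 0 (pvGet2 t (i - 1) 0 + pvGet2 origin_map i 0)) s2
  (PySem.List.pyRange 1 m 1).foldl
    (fun t i => (PySem.List.pyRange 1 n 1).foldl
      (fun t g => pvSet2 t g i (max (pvGet2 t (g - 1) i) (pvGet2 t g (i - 1)) + pvGet2 origin_map g i)) t) s3

-- ===== PORT B =====
def make_sum_map_alt (n : Int) (m : Int) (origin_map : List (List Int)) : List (List Int) :=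
  let summs := (PySem.List.pyRange 0 n 1).map (fun _ => List.replicate m.toNat (0 : Int))
  let summs := pvSet2 summs 0 0 (pvGet2 origin_map 0 0)
  (PySem.List.pyRange 1 (n + m - 1) 1).foldl (fun t d =>
    (PySem.List.pyRange (max 0 (d - m + 1)) ((min d (n - 1)) + 1) 1).foldl (fun t g =>
      pvSet2 t g (d - g)
        ((if g = 0 then pvGet2 t 0 ((d - g) - 1)
          else if d - g = 0 then pvGet2 t (g - 1) 0
          else max (pvGet2 t (g - 1) (d - g)) (pvGet2 t g ((d - g) - 1))) + pvGet2 origin_map g (d - g))) t) summs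

-- ===== PRECONDITION & SPEC =====
-- Pre_: exactly the inputs on which Python A returns normally (A raises IndexError when
-- n < 1, m < 1, origin_map has fewer than n rows, or one of the first n rows has fewer than m entries)
def Pre_make_sum_map (n : Int) (m : Int) (origin_map : List (List Int)) : Prop :=
  1 ≤ n ∧ 1 ≤ m ∧ n ≤ (origin_map.length : Int) ∧
    ∀ r ∈ origin_map.take n.toNat, m ≤ (r.length : Int)

instance (n : Int) (m : Int) (origin_map : List (List Int)) : Decidable (Pre_make_sum_map n m origin_map) := by
  unfold Pre_make_sum_map; infer_instance

def pvWitness_make_sum_map : Int × Int × List (List Int) := (2, 2, [[1, 2], [3, 4]])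

def Spec_make_sum_map (n : Int) (m : Int) (origin_map : List (List Int)) (out : List (List Int)) : Prop := out = make_sum_map_alt n m origin_map
instance (n : Int) (m : Int) (origin_map : List (List Int)) (out : List (List Int)) : Decidable (Spec_make_sum_map n m origin_map out) := by unfold Spec_make_sum_map; infer_instance

-- ===== CLAIM (what is proved, stated in full; the proofs are below) =====
def Claim_equal_make_sum_map : Prop := ∀ (n : Int) (m : Int) (origin_map : List (List Int)), Dom_make_sum_map n m origin_map → Pre_make_sum_map n m origin_map → Spec_make_sum_map n m origin_map (make_sum_map n m origin_map)

-- ===== LEMMAS AND PROOFS =====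

-- the entries of origin_map as a total function (defaults never reached on Pre_)
def pvO (om : List (List Int)) (g i : Nat) : Int := (om.getD g []).getD i 0

-- the canonical DP values: row 0, successor rows, the whole table
def pvDpRow0 (o : Nat → Int) : Nat → Int
  | 0 => o 0
  | i + 1 => pvDpRow0 o i + o (i + 1)

def pvDpRowS (p o : Nat → Int) : Nat → Int
  | 0 => p 0 + o 0
  | i + 1 => max (p (i + 1)) (pvDpRowS p o i) + o (i + 1)

def pvDp (om : List (List Int)) : Nat → Nat → Int
  | 0 => pvDpRow0 (pvO om 0)
  | g + 1 => pvDpRowS (pvDp om g) (pvO om (g + 1))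

-- the canonical n×m table built from a value function
def pvRep (N M : Nat) (f : Nat → Nat → Int) : List (List Int) :=
  (List.range N).map (fun g => (List.range M).map (f g))

theorem pvRange_toNat (a b : Int) (h : 0 ≤ a) :
    PySem.List.pyRange a b 1 = PySem.List.pyRange a (b.toNat : Int) 1 := by
  rw [PySem.List.pyRange_one, PySem.List.pyRange_one]
  have hh : (b - a).toNat = ((b.toNat : Int) - a).toNat := by omega
  rw [hh]

theorem pvMapRangeSet {α : Type} (N a : Nat) (f : Nat → α) (v : α) :
    ((List.range N).map f).set a v = (List.range N).map (fun g => if g = a then v else f g) := by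
  apply List.ext_getElem
  · simp
  · intro k h1 h2
    simp only [List.getElem_set, List.getElem_map, List.getElem_range] at *
    by_cases hk : a = k
    · simp [hk]
    · have hk2 : ¬ (k = a) := fun h => hk (Eq.symm h)
      simp [hk, hk2]

theorem pvGetDMapRange {α : Type} (N k : Nat) (f : Nat → α) (d : α) :
    ((List.range N).map f).getD k d = if k < N then f k else d := by
  by_cases h : k < N
  · rw [List.getD_eq_getElem _ _ (by simpa using h)]
    simp [h]
  · rw [List.getD_eq_default _ _ (by simpa using h)]
    simp [h]

theorem pvRep_congr (N M : Nat) (f f' : Nat → Nat → Int)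
    (h : ∀ g < N, ∀ i < M, f g i = f' g i) : pvRep N M f = pvRep N M f' := by
  unfold pvRep
  apply List.map_congr_left
  intro g hg
  apply List.map_congr_left
  intro i hi
  exact h g (List.mem_range.mp hg) i (List.mem_range.mp hi)

theorem pvGet2_rep (N M : Nat) (f : Nat → Nat → Int) (a b : Nat) :
    pvGet2 (pvRep N M f) (a : Int) (b : Int) = if a < N ∧ b < M then f a b else 0 := by
  unfold pvGet2 pvRep
  rw [PySem.List.pyGetD_natCast, PySem.List.pyGetD_natCast]
  rw [pvGetDMapRange]
  by_cases ha : a < N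
  · simp only [ha, if_true, true_and]
    rw [pvGetDMapRange]
  · simp [ha]

theorem pvSet2_rep (N M : Nat) (f : Nat → Nat → Int) (a b : Nat) (v : Int) :
    pvSet2 (pvRep N M f) (a : Int) (b : Int) v
      = pvRep N M (fun g i => if g = a ∧ i = b then v else f g i) := by
  unfold pvSet2 pvRep
  rw [PySem.List.pyGetD_natCast, PySem.List.pySetD_natCast, PySem.List.pySetD_natCast]
  rw [pvGetDMapRange]
  by_cases ha : a < N
  · simp only [ha, if_true]
    rw [pvMapRangeSet, pvMapRangeSet]
    apply List.map_congr_left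
    intro g hg
    by_cases hga : g = a
    · subst hga
      simp only [if_true]
      apply List.map_congr_left
      intro i _
      by_cases hib : i = b <;> simp [hib]
    · simp only [if_neg hga]
      apply List.map_congr_left
      intro i _
      simp [hga]
  · simp only [ha, if_false]
    rw [List.set_eq_of_length_le (by simpa using ha)]
    apply List.map_congr_left
    intro g hg
    apply List.map_congr_left
    intro i _
    have : g ≠ a := by
      intro h; exact ha (h ▸ List.mem_range.mp hg)
    simp [this]

theorem pvSet2_rep00 (N M : Nat) (f : Nat → Nat → Int) (v : Int) :
    pvSet2 (pvRep N M f) 0 0 v = pvRep N M (fun g i => if g = 0 ∧ i = 0 then v else f g i) := by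
  simpa using pvSet2_rep N M f 0 0 v

theorem pvGet200 (om : List (List Int)) : pvGet2 om 0 0 = pvO om 0 0 := by
  unfold pvGet2 pvO
  rw [PySem.List.pyGetD_zero, PySem.List.pyGetD_zero]

theorem pvGet2_om (om : List (List Int)) (g i : Nat) :
    pvGet2 om (g : Int) (i : Int) = pvO om g i := by
  unfold pvGet2 pvO
  rw [PySem.List.pyGetD_natCast, PySem.List.pyGetD_natCast]

-- phase functions of A's fill
def pvPhi1 (om : List (List Int)) (k : Nat) (g i : Nat) : Int :=
  if g = 0 ∧ i < k then pvDp om 0 i else 0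

def pvPhi2 (om : List (List Int)) (M r : Nat) (g i : Nat) : Int :=
  if g = 0 ∧ i < M then pvDp om 0 i else if i = 0 ∧ g < r then pvDp om g 0 else 0

def pvPsi (om : List (List Int)) (M N c : Nat) (g i : Nat) : Int :=
  if (g = 0 ∧ i < M) ∨ (i = 0 ∧ g < N) ∨ (1 ≤ i ∧ i < c ∧ g < N ∧ i < M) then pvDp om g i else 0

def pvChi (om : List (List Int)) (M N c r : Nat) (g i : Nat) : Int :=
  if (g = 0 ∧ i < M) ∨ (i = 0 ∧ g < N) ∨ (1 ≤ i ∧ i < c ∧ g < N ∧ i < M) ∨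
     (i = c ∧ g < r ∧ g < N ∧ i < M) then pvDp om g i else 0

theorem pvDpS_succ (om : List (List Int)) (g i : Nat) :
    pvDp om (g + 1) (i + 1)
      = max (pvDp om g (i + 1)) (pvDp om (g + 1) i) + pvO om (g + 1) (i + 1) := rfl

theorem pvLoop1 (om : List (List Int)) (N M : Nat) (j : Nat) :
    (PySem.List.pyRange 1 ((1 + j : Nat) : Int) 1).foldl
      (fun t i => pvSet2 t 0 i (pvGet2 t 0 (i - 1) + pvGet2 om 0 i))
      (pvRep N M (pvPhi1 om 1))
    = pvRep N M (pvPhi1 om (1 + j)) := by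
  induction j with
  | zero => simp [PySem.List.pyRange_one_eq_nil]
  | succ j ih =>
    have hsplit : PySem.List.pyRange 1 ((1 + (j+1) : Nat) : Int) 1
        = PySem.List.pyRange 1 ((1 + j : Nat) : Int) 1 ++ [((1 + j : Nat) : Int)] := by
      have := PySem.List.pyRange_one_succ_right (a := 1) (b := ((1 + j : Nat) : Int)) (by omega)
      rw [show ((1 + (j+1) : Nat) : Int) = ((1 + j : Nat) : Int) + 1 by push_cast; ring]
      exact this
    rw [hsplit, List.foldl_append, ih]
    simp only [List.foldl_cons, List.foldl_nil]
    have hsub : ((1 + j : Nat) : Int) - 1 = ((j : Nat) : Int) := by push_cast; ring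
    rw [hsub, show (0 : Int) = ((0 : Nat) : Int) from rfl]
    rw [pvSet2_rep N M _ 0 (1 + j), pvGet2_rep N M _ 0 j, pvGet2_om om 0 (1 + j)]
    apply pvRep_congr
    intro g hg i hi
    by_cases hcase : g = 0 ∧ i = 1 + j
    · obtain ⟨rfl, rfl⟩ := hcase
      rw [if_pos ⟨rfl, rfl⟩, if_pos ⟨hg, by omega⟩]
      have hval : pvPhi1 om (1 + j) 0 j = pvDp om 0 j := by
        unfold pvPhi1
        split_ifs <;> first | rfl | omega
      have hrhs : pvPhi1 om (1 + (j + 1)) 0 (1 + j) = pvDp om 0 (1 + j) := by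
        unfold pvPhi1
        split_ifs <;> first | rfl | omega
      rw [hval, hrhs, show (1 + j : Nat) = j + 1 from by omega]
      rfl
    · rw [if_neg hcase]
      unfold pvPhi1
      split_ifs <;> first | rfl | omega

theorem pvLoop1' (om : List (List Int)) (N M : Nat) (K : Nat) (hK : 1 ≤ K) :
    (PySem.List.pyRange 1 ((K : Nat) : Int) 1).foldl
      (fun t i => pvSet2 t 0 i (pvGet2 t 0 (i - 1) + pvGet2 om 0 i))
      (pvRep N M (pvPhi1 om 1))
    = pvRep N M (pvPhi1 om K) := by
  obtain ⟨j, rfl⟩ : ∃ j, K = 1 + j := ⟨K - 1, by omega⟩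
  exact pvLoop1 om N M j

theorem pvLoop2 (om : List (List Int)) (N M : Nat) (j : Nat) :
    (PySem.List.pyRange 1 ((1 + j : Nat) : Int) 1).foldl
      (fun t i => pvSet2 t i 0 (pvGet2 t (i - 1) 0 + pvGet2 om i 0))
      (pvRep N M (pvPhi2 om M 1))
    = pvRep N M (pvPhi2 om M (1 + j)) := by
  induction j with
  | zero => simp [PySem.List.pyRange_one_eq_nil]
  | succ j ih =>
    have hsplit : PySem.List.pyRange 1 ((1 + (j+1) : Nat) : Int) 1
        = PySem.List.pyRange 1 ((1 + j : Nat) : Int) 1 ++ [((1 + j : Nat) : Int)] := by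
      have := PySem.List.pyRange_one_succ_right (a := 1) (b := ((1 + j : Nat) : Int)) (by omega)
      rw [show ((1 + (j+1) : Nat) : Int) = ((1 + j : Nat) : Int) + 1 by push_cast; ring]
      exact this
    rw [hsplit, List.foldl_append, ih]
    simp only [List.foldl_cons, List.foldl_nil]
    have hsub : ((1 + j : Nat) : Int) - 1 = ((j : Nat) : Int) := by push_cast; ring
    rw [hsub, show (0 : Int) = ((0 : Nat) : Int) from rfl]
    rw [pvSet2_rep N M _ (1 + j) 0, pvGet2_rep N M _ j 0, pvGet2_om om (1 + j) 0]
    apply pvRep_congr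
    intro g hg i hi
    by_cases hcase : g = 1 + j ∧ i = 0
    · obtain ⟨rfl, rfl⟩ := hcase
      rw [if_pos ⟨rfl, rfl⟩, if_pos ⟨by omega, hi⟩]
      have hval : pvPhi2 om M (1 + j) j 0 = pvDp om j 0 := by
        unfold pvPhi2
        split_ifs with h1 h2
        · obtain ⟨rfl, -⟩ := h1
          rfl
        · rfl
        · omega
      have hrhs : pvPhi2 om M (1 + (j + 1)) (1 + j) 0 = pvDp om (1 + j) 0 := by
        unfold pvPhi2
        split_ifs <;> first | rfl | omega
      rw [hval, hrhs, show (1 + j : Nat) = j + 1 from by omega]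
      rfl
    · rw [if_neg hcase]
      unfold pvPhi2
      split_ifs <;> first | rfl | omega

theorem pvLoop2' (om : List (List Int)) (N M : Nat) (K : Nat) (hK : 1 ≤ K) :
    (PySem.List.pyRange 1 ((K : Nat) : Int) 1).foldl
      (fun t i => pvSet2 t i 0 (pvGet2 t (i - 1) 0 + pvGet2 om i 0))
      (pvRep N M (pvPhi2 om M 1))
    = pvRep N M (pvPhi2 om M K) := by
  obtain ⟨j, rfl⟩ : ∃ j, K = 1 + j := ⟨K - 1, by omega⟩
  exact pvLoop2 om N M j

theorem pvLoopInner (om : List (List Int)) (N M : Nat) (c : Nat) (hc : 1 ≤ c) (j : Nat) :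
    (PySem.List.pyRange 1 ((1 + j : Nat) : Int) 1).foldl
      (fun t g => pvSet2 t g ((c : Nat) : Int)
        (max (pvGet2 t (g - 1) ((c : Nat) : Int)) (pvGet2 t g (((c : Nat) : Int) - 1)) + pvGet2 om g ((c : Nat) : Int)))
      (pvRep N M (pvChi om M N c 1))
    = pvRep N M (pvChi om M N c (1 + j)) := by
  induction j with
  | zero => simp [PySem.List.pyRange_one_eq_nil]
  | succ j ih =>
    have hsplit : PySem.List.pyRange 1 ((1 + (j+1) : Nat) : Int) 1
        = PySem.List.pyRange 1 ((1 + j : Nat) : Int) 1 ++ [((1 + j : Nat) : Int)] := by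
      have := PySem.List.pyRange_one_succ_right (a := 1) (b := ((1 + j : Nat) : Int)) (by omega)
      rw [show ((1 + (j+1) : Nat) : Int) = ((1 + j : Nat) : Int) + 1 by push_cast; ring]
      exact this
    rw [hsplit, List.foldl_append, ih]
    simp only [List.foldl_cons, List.foldl_nil]
    have hsub1 : ((1 + j : Nat) : Int) - 1 = ((j : Nat) : Int) := by push_cast; ring
    have hsub2 : ((c : Nat) : Int) - 1 = (((c - 1 : Nat)) : Int) := by omega
    rw [hsub1, hsub2]
    rw [pvSet2_rep N M _ (1 + j) c, pvGet2_rep N M _ j c, pvGet2_rep N M _ (1 + j) (c - 1),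
        pvGet2_om om (1 + j) c]
    apply pvRep_congr
    intro g hg i hi
    by_cases hcase : g = 1 + j ∧ i = c
    · obtain ⟨rfl, rfl⟩ := hcase
      rw [if_pos ⟨rfl, rfl⟩, if_pos ⟨by omega, hi⟩, if_pos ⟨hg, by omega⟩]
      have hval1 : pvChi om M N i (1 + j) j i = pvDp om j i := by
        unfold pvChi
        split_ifs <;> first | rfl | omega
      have hval2 : pvChi om M N i (1 + j) (1 + j) (i - 1) = pvDp om (1 + j) (i - 1) := by
        unfold pvChi
        split_ifs <;> first | rfl | omega
      have hrhs : pvChi om M N i (1 + (j + 1)) (1 + j) i = pvDp om (1 + j) i := by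
        unfold pvChi
        split_ifs <;> first | rfl | omega
      rw [hval1, hval2, hrhs]
      obtain ⟨cp, rfl⟩ : ∃ cp, i = cp + 1 := ⟨i - 1, by omega⟩
      rw [show (1 + j : Nat) = j + 1 from by omega, pvDpS_succ]
      rfl
    · rw [if_neg hcase]
      unfold pvChi
      split_ifs <;> first | rfl | omega

theorem pvLoopOuter (om : List (List Int)) (N M : Nat) (j : Nat) :
    (PySem.List.pyRange 1 ((1 + j : Nat) : Int) 1).foldl
      (fun t i => (PySem.List.pyRange 1 ((N : Nat) : Int) 1).foldl
        (fun t g => pvSet2 t g i (max (pvGet2 t (g - 1) i) (pvGet2 t g (i - 1)) + pvGet2 om g i)) t)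
      (pvRep N M (pvPsi om M N 1))
    = pvRep N M (pvPsi om M N (1 + j)) := by
  induction j with
  | zero => simp [PySem.List.pyRange_one_eq_nil]
  | succ j ih =>
    have hsplit : PySem.List.pyRange 1 ((1 + (j+1) : Nat) : Int) 1
        = PySem.List.pyRange 1 ((1 + j : Nat) : Int) 1 ++ [((1 + j : Nat) : Int)] := by
      have := PySem.List.pyRange_one_succ_right (a := 1) (b := ((1 + j : Nat) : Int)) (by omega)
      rw [show ((1 + (j+1) : Nat) : Int) = ((1 + j : Nat) : Int) + 1 by push_cast; ring]
      exact this
    rw [hsplit, List.foldl_append, ih]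
    simp only [List.foldl_cons, List.foldl_nil]
    have hstart : pvRep N M (pvPsi om M N (1 + j)) = pvRep N M (pvChi om M N (1 + j) 1) := by
      apply pvRep_congr
      intro g hg i hi
      unfold pvPsi pvChi
      split_ifs <;> first | rfl | omega
    rw [hstart]
    rcases Nat.eq_zero_or_pos N with hN | hN
    · subst hN
      rw [show ((0 : Nat) : Int) = ((0 : Int)) from rfl, PySem.List.pyRange_one_eq_nil (by omega)]
      simp only [List.foldl_nil]
      apply pvRep_congr
      intro g hg i hi
      exact absurd hg (by omega)
    · have hNcast : ((N : Nat) : Int) = ((1 + (N - 1) : Nat) : Int) := by omega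
      rw [hNcast, pvLoopInner om N M (1 + j) (by omega) (N - 1)]
      rw [show (1 + (N - 1) : Nat) = N from by omega]
      apply pvRep_congr
      intro g hg i hi
      unfold pvChi pvPsi
      split_ifs <;> first | rfl | omega

theorem pvLoopOuter' (om : List (List Int)) (N M : Nat) (K : Nat) (hK : 1 ≤ K) :
    (PySem.List.pyRange 1 ((K : Nat) : Int) 1).foldl
      (fun t i => (PySem.List.pyRange 1 ((N : Nat) : Int) 1).foldl
        (fun t g => pvSet2 t g i (max (pvGet2 t (g - 1) i) (pvGet2 t g (i - 1)) + pvGet2 om g i)) t)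
      (pvRep N M (pvPsi om M N 1))
    = pvRep N M (pvPsi om M N K) := by
  obtain ⟨j, rfl⟩ : ∃ j, K = 1 + j := ⟨K - 1, by omega⟩
  exact pvLoopOuter om N M j

theorem pvZeros (N M : Nat) :
    (PySem.List.pyRange 0 ((N : Nat) : Int) 1).map
      (fun _ => (PySem.List.pyRange 0 ((M : Nat) : Int) 1).map (fun _ => (0 : Int)))
    = pvRep N M (fun _ _ => 0) := by
  rw [PySem.List.pyRange_one, PySem.List.pyRange_one]
  have e1 : (((N : Nat) : Int) - 0).toNat = N := by omega
  have e2 : (((M : Nat) : Int) - 0).toNat = M := by omega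
  rw [e1, e2]
  unfold pvRep
  simp [List.map_map, Function.comp_def]

theorem pvInit1 (om : List (List Int)) (N M : Nat) :
    pvRep N M (fun g i => if g = 0 ∧ i = 0 then pvO om 0 0 else 0) = pvRep N M (pvPhi1 om 1) := by
  apply pvRep_congr
  intro g hg i hi
  unfold pvPhi1
  by_cases h : g = 0 ∧ i = 0
  · obtain ⟨rfl, rfl⟩ := h
    rw [if_pos ⟨rfl, rfl⟩, if_pos ⟨rfl, by omega⟩]
    rfl
  · rw [if_neg h, if_neg (by omega)]

theorem pvPhi1_to_phi2 (om : List (List Int)) (N M : Nat) :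
    pvRep N M (pvPhi1 om M) = pvRep N M (pvPhi2 om M 1) := by
  apply pvRep_congr
  intro g hg i hi
  unfold pvPhi1 pvPhi2
  split_ifs <;> first | rfl | omega

theorem pvPhi2_to_psi (om : List (List Int)) (N M : Nat) :
    pvRep N M (pvPhi2 om M N) = pvRep N M (pvPsi om M N 1) := by
  apply pvRep_congr
  intro g hg i hi
  unfold pvPhi2 pvPsi
  by_cases h1 : g = 0 ∧ i < M
  · obtain ⟨rfl, -⟩ := h1
    rw [if_pos ⟨rfl, hi⟩, if_pos (Or.inl ⟨rfl, hi⟩)]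
  · rw [if_neg h1]
    by_cases h2 : i = 0 ∧ g < N
    · obtain ⟨rfl, -⟩ := h2
      rw [if_pos ⟨rfl, hg⟩, if_pos (Or.inr (Or.inl ⟨rfl, hg⟩))]
    · rw [if_neg h2, if_neg (by omega)]

theorem pvPsi_to_dp (om : List (List Int)) (N M : Nat) :
    pvRep N M (pvPsi om M N M) = pvRep N M (pvDp om) := by
  apply pvRep_congr
  intro g hg i hi
  unfold pvPsi
  rw [if_pos (by omega)]

-- characterization of A
theorem pvA_eq (n m : Int) (om : List (List Int)) (hn : 1 ≤ n) (hm : 1 ≤ m) :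
    make_sum_map n m om = pvRep n.toNat m.toNat (pvDp om) := by
  unfold make_sum_map
  simp only []
  rw [pvRange_toNat 0 n (by omega), pvRange_toNat 0 m (by omega),
      pvRange_toNat 1 m (by omega), pvRange_toNat 1 n (by omega)]
  rw [pvZeros, pvGet200, pvSet2_rep00, pvInit1,
      pvLoop1' om n.toNat m.toNat m.toNat (by omega),
      pvPhi1_to_phi2, pvLoop2' om n.toNat m.toNat n.toNat (by omega),
      pvPhi2_to_psi, pvLoopOuter' om n.toNat m.toNat m.toNat (by omega),
      pvPsi_to_dp]

-- phase functions of B's wavefront fill: after all diagonals < d (corner pre-seeded),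
-- and within diagonal d after the cells with row index < r
def pvPhiD (om : List (List Int)) (d : Nat) (g i : Nat) : Int :=
  if g + i < d ∨ (g = 0 ∧ i = 0) then pvDp om g i else 0

def pvChiD (om : List (List Int)) (d r : Nat) (g i : Nat) : Int :=
  if g + i < d ∨ (g + i = d ∧ g < r) ∨ (g = 0 ∧ i = 0) then pvDp om g i else 0

theorem pvZerosB (N M : Nat) :
    (PySem.List.pyRange 0 ((N : Nat) : Int) 1).map (fun _ => List.replicate M (0 : Int))
      = pvRep N M (fun _ _ => 0) := by
  rw [PySem.List.pyRange_one]
  have e1 : (((N : Nat) : Int) - 0).toNat = N := by omega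
  rw [e1]
  unfold pvRep
  simp [List.map_map, Function.comp_def, List.map_const']

theorem pvInitD (om : List (List Int)) (N M : Nat) :
    pvRep N M (fun g i => if g = 0 ∧ i = 0 then pvO om 0 0 else 0) = pvRep N M (pvPhiD om 1) := by
  apply pvRep_congr
  intro g hg i hi
  unfold pvPhiD
  by_cases h : g = 0 ∧ i = 0
  · obtain ⟨rfl, rfl⟩ := h
    rw [if_pos ⟨rfl, rfl⟩, if_pos (by omega)]
    rfl
  · rw [if_neg h, if_neg (by omega)]

-- one diagonal of B's fill
theorem pvDInner (om : List (List Int)) (N M : Nat) (hN : 1 ≤ N) (_hM : 1 ≤ M)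
    (d : Nat) (hd : 1 ≤ d) (G0 : Nat) (hG0 : G0 = d + 1 - M) (j : Nat)
    (hj : G0 + j ≤ min d (N - 1) + 1) :
    (PySem.List.pyRange ((G0 : Nat) : Int) ((G0 + j : Nat) : Int) 1).foldl
      (fun t g =>
        pvSet2 t g (((d : Nat) : Int) - g)
          ((if g = 0 then pvGet2 t 0 ((((d : Nat) : Int) - g) - 1)
            else if ((d : Nat) : Int) - g = 0 then pvGet2 t (g - 1) 0
            else max (pvGet2 t (g - 1) (((d : Nat) : Int) - g)) (pvGet2 t g ((((d : Nat) : Int) - g) - 1)))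
            + pvGet2 om g (((d : Nat) : Int) - g)))
      (pvRep N M (pvChiD om d G0))
    = pvRep N M (pvChiD om d (G0 + j)) := by
  induction j with
  | zero =>
    rw [show ((G0 + 0 : Nat) : Int) = ((G0 : Nat) : Int) by norm_num,
        PySem.List.pyRange_one_eq_nil (by omega)]
    rfl
  | succ j ih =>
    have hj' : G0 + j ≤ min d (N - 1) + 1 := by omega
    have hsplit : PySem.List.pyRange ((G0 : Nat) : Int) ((G0 + (j + 1) : Nat) : Int) 1
        = PySem.List.pyRange ((G0 : Nat) : Int) ((G0 + j : Nat) : Int) 1 ++ [((G0 + j : Nat) : Int)] := by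
      have := PySem.List.pyRange_one_succ_right (a := ((G0 : Nat) : Int)) (b := ((G0 + j : Nat) : Int)) (by omega)
      rw [show ((G0 + (j + 1) : Nat) : Int) = ((G0 + j : Nat) : Int) + 1 by push_cast; ring]
      exact this
    rw [hsplit, List.foldl_append, ih hj']
    simp only [List.foldl_cons, List.foldl_nil]
    -- the processed cell
    have hgle : G0 + j ≤ d := by omega
    have hgN : G0 + j < N := by omega
    set gv : Nat := G0 + j with hgv
    set iv : Nat := d - gv with hiv
    have hivd : gv + iv = d := by omega
    have hivM : iv < M := by omega
    have hcast1 : ((d : Nat) : Int) - ((gv : Nat) : Int) = ((iv : Nat) : Int) := by omega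
    rw [hcast1]
    by_cases hg0 : gv = 0
    · -- top row: d = iv ≥ 1
      have hiv1 : 1 ≤ iv := by omega
      rw [if_pos (by rw [hg0]; norm_num)]
      have hcast2 : ((iv : Nat) : Int) - 1 = ((iv - 1 : Nat) : Int) := by omega
      rw [hcast2, hg0, show (0 : Int) = ((0 : Nat) : Int) from rfl]
      rw [pvSet2_rep N M _ 0 iv, pvGet2_rep N M _ 0 (iv - 1), pvGet2_om om 0 iv]
      apply pvRep_congr
      intro g hg i hi
      by_cases hcase : g = 0 ∧ i = iv
      · obtain ⟨rfl, rfl⟩ := hcase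
        rw [if_pos ⟨rfl, rfl⟩, if_pos ⟨hg, by omega⟩]
        have hval : pvChiD om d 0 0 (iv - 1) = pvDp om 0 (iv - 1) := by
          unfold pvChiD
          split_ifs <;> first | rfl | omega
        have hrhs : pvChiD om d (G0 + (j + 1)) 0 iv = pvDp om 0 iv := by
          unfold pvChiD
          split_ifs <;> first | rfl | omega
        rw [hval, hrhs]
        obtain ⟨ip, hip⟩ : ∃ ip, iv = ip + 1 := ⟨iv - 1, by omega⟩
        rw [hip]
        rfl
      · rw [if_neg hcase]
        unfold pvChiD
        split_ifs <;> first | rfl | omega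
    · have hgv1 : 1 ≤ gv := by omega
      rw [if_neg (by omega)]
      by_cases hi0 : iv = 0
      · -- left column: gv = d ≥ 1
        rw [if_pos (by omega)]
        have hcast3 : ((gv : Nat) : Int) - 1 = ((gv - 1 : Nat) : Int) := by omega
        rw [hcast3, hi0, show (0 : Int) = ((0 : Nat) : Int) from rfl]
        rw [pvSet2_rep N M _ gv 0, pvGet2_rep N M _ (gv - 1) 0, pvGet2_om om gv 0]
        apply pvRep_congr
        intro g hg i hi
        by_cases hcase : g = gv ∧ i = 0
        · obtain ⟨rfl, rfl⟩ := hcase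
          rw [if_pos ⟨rfl, rfl⟩, if_pos ⟨by omega, hi⟩]
          have hval : pvChiD om d (G0 + j) (gv - 1) 0 = pvDp om (gv - 1) 0 := by
            unfold pvChiD
            split_ifs <;> first | rfl | omega
          have hrhs : pvChiD om d (G0 + (j + 1)) gv 0 = pvDp om gv 0 := by
            unfold pvChiD
            split_ifs <;> first | rfl | omega
          rw [hval, hrhs]
          obtain ⟨gp, hgp⟩ : ∃ gp, gv = gp + 1 := ⟨gv - 1, by omega⟩
          rw [hgp]
          rfl
        · rw [if_neg hcase]
          unfold pvChiD
          split_ifs <;> first | rfl | omega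
      · -- interior
        rw [if_neg (by omega)]
        have hcast3 : ((gv : Nat) : Int) - 1 = ((gv - 1 : Nat) : Int) := by omega
        have hcast4 : ((iv : Nat) : Int) - 1 = ((iv - 1 : Nat) : Int) := by omega
        rw [hcast3, hcast4]
        rw [pvSet2_rep N M _ gv iv, pvGet2_rep N M _ (gv - 1) iv, pvGet2_rep N M _ gv (iv - 1),
            pvGet2_om om gv iv]
        apply pvRep_congr
        intro g hg i hi
        by_cases hcase : g = gv ∧ i = iv
        · obtain ⟨rfl, rfl⟩ := hcase
          rw [if_pos ⟨rfl, rfl⟩, if_pos ⟨by omega, hi⟩, if_pos ⟨hg, by omega⟩]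
          have hval1 : pvChiD om d (G0 + j) (gv - 1) iv = pvDp om (gv - 1) iv := by
            unfold pvChiD
            split_ifs <;> first | rfl | omega
          have hval2 : pvChiD om d (G0 + j) gv (iv - 1) = pvDp om gv (iv - 1) := by
            unfold pvChiD
            split_ifs <;> first | rfl | omega
          have hrhs : pvChiD om d (G0 + (j + 1)) gv iv = pvDp om gv iv := by
            unfold pvChiD
            split_ifs <;> first | rfl | omega
          rw [hval1, hval2, hrhs]
          obtain ⟨gp, hgp⟩ : ∃ gp, gv = gp + 1 := ⟨gv - 1, by omega⟩
          obtain ⟨ip, hip⟩ : ∃ ip, iv = ip + 1 := ⟨iv - 1, by omega⟩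
          rw [hgp, hip]
          exact (pvDpS_succ om gp ip).symm
        · rw [if_neg hcase]
          unfold pvChiD
          split_ifs <;> first | rfl | omega

theorem pvDOuter (om : List (List Int)) (N M : Nat) (hN : 1 ≤ N) (hM : 1 ≤ M)
    (j : Nat) (hjb : 1 + j ≤ N + M - 1) :
    (PySem.List.pyRange 1 ((1 + j : Nat) : Int) 1).foldl
      (fun t d =>
        (PySem.List.pyRange (max 0 (d - ((M : Nat) : Int) + 1)) ((min d (((N : Nat) : Int) - 1)) + 1) 1).foldl
          (fun t g =>
            pvSet2 t g (d - g)
              ((if g = 0 then pvGet2 t 0 ((d - g) - 1)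
                else if d - g = 0 then pvGet2 t (g - 1) 0
                else max (pvGet2 t (g - 1) (d - g)) (pvGet2 t g ((d - g) - 1)))
                + pvGet2 om g (d - g))) t)
      (pvRep N M (pvPhiD om 1))
    = pvRep N M (pvPhiD om (1 + j)) := by
  induction j with
  | zero => simp [PySem.List.pyRange_one_eq_nil]
  | succ j ih =>
    have hsplit : PySem.List.pyRange 1 ((1 + (j+1) : Nat) : Int) 1
        = PySem.List.pyRange 1 ((1 + j : Nat) : Int) 1 ++ [((1 + j : Nat) : Int)] := by
      have := PySem.List.pyRange_one_succ_right (a := 1) (b := ((1 + j : Nat) : Int)) (by omega)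
      rw [show ((1 + (j+1) : Nat) : Int) = ((1 + j : Nat) : Int) + 1 by push_cast; ring]
      exact this
    rw [hsplit, List.foldl_append, ih (by omega)]
    simp only [List.foldl_cons, List.foldl_nil]
    set d : Nat := 1 + j with hdd
    have hd1 : 1 ≤ d := by omega
    have hdb : d ≤ N + M - 2 := by omega
    set G0 : Nat := d + 1 - M with hG0
    set L : Nat := min d (N - 1) + 1 - G0 with hL
    have hG0L : G0 + L = min d (N - 1) + 1 := by omega
    have hcastA : max 0 (((d : Nat) : Int) - ((M : Nat) : Int) + 1) = ((G0 : Nat) : Int) := by omega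
    have hcastB : (min ((d : Nat) : Int) (((N : Nat) : Int) - 1)) + 1 = ((G0 + L : Nat) : Int) := by omega
    rw [hcastA, hcastB]
    have hstart : pvRep N M (pvPhiD om d) = pvRep N M (pvChiD om d G0) := by
      apply pvRep_congr
      intro g hg i hi
      unfold pvPhiD pvChiD
      split_ifs <;> first | rfl | omega
    rw [hstart, pvDInner om N M hN hM d hd1 G0 hG0 L (by omega)]
    apply pvRep_congr
    intro g hg i hi
    unfold pvChiD pvPhiD
    split_ifs <;> first | rfl | omega

theorem pvPhiD_to_dp (om : List (List Int)) (N M : Nat) (hN : 1 ≤ N) (hM : 1 ≤ M) :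
    pvRep N M (pvPhiD om (N + M - 1)) = pvRep N M (pvDp om) := by
  apply pvRep_congr
  intro g hg i hi
  unfold pvPhiD
  rw [if_pos (by omega)]

-- characterization of B
theorem pvB_eq (n m : Int) (om : List (List Int)) (hn : 1 ≤ n) (hm : 1 ≤ m) :
    make_sum_map_alt n m om = pvRep n.toNat m.toNat (pvDp om) := by
  unfold make_sum_map_alt
  simp only []
  have hn' : n = ((n.toNat : Nat) : Int) := by omega
  have hm' : m = ((m.toNat : Nat) : Int) := by omega
  set N : Nat := n.toNat
  set M : Nat := m.toNat
  rw [hn', hm']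
  rw [show ((N : Nat) : Int) + ((M : Nat) : Int) - 1 = ((N + M - 1 : Nat) : Int) by omega]
  rw [pvZerosB, pvGet200, pvSet2_rep00, pvInitD]
  have hKsplit : ∃ j, N + M - 1 = 1 + j := ⟨N + M - 2, by omega⟩
  obtain ⟨j, hj⟩ := hKsplit
  rw [hj, pvDOuter om N M (by omega) (by omega) j (by omega), ← hj,
      pvPhiD_to_dp om N M (by omega) (by omega)]

-- ===== VERDICT (by name: the statement is the Claim_ definition above) =====
theorem make_sum_map_spec : Claim_equal_make_sum_map := by
  intro n m om _ hpre
  show make_sum_map n m om = make_sum_map_alt n m om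
  rw [pvA_eq n m om hpre.1 hpre.2.1, pvB_eq n m om hpre.1 hpre.2.1]
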